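-- pv_equiv track=rewrite | github.com/Karna-Balaji-07/DSA_Sheet | Greedy Algorithms/Maximum Bags with Full capacity of rocks.py | solution
-- ===== SOURCE A (Python) =====
-- def solution(capacity, rocks, additional):
--     difference = [0]*len(rocks)
--     for i in range(len(rocks)):
--         difference[i] = capacity[i] - rocks[i]
--     count = 0
--     difference.sort()
--     for i in range(len(rocks)):
--         if difference[i] > additional:
--             break
--         additional -= difference[i]
--         count += 1
--     return count
-- ===== SOURCE B (Python) =====
-- def solution(capacity, rocks, additional):
--     # Sort-free selection: repeatedly extract the minimum gap from the unsorted pool.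
--     gaps = [c - r for c, r in zip(capacity, rocks)]
--     count = 0
--     while gaps:
--         m = min(gaps)
--         if m > additional:
--             break
--         gaps.remove(m)
--         additional -= m
--         count += 1
--     return count
-- ===== Notes on version B (the rewrite author's own statement) =====
-- stated objective: alternative
-- what changed: Removes the sort entirely: instead of building a difference array, sorting it and scanning with a break, B repeatedly extracts the minimum gap from the unsorted zip-built pool (selection), paying it from the budget until the current minimum exceeds it.
import Mathlib
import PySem

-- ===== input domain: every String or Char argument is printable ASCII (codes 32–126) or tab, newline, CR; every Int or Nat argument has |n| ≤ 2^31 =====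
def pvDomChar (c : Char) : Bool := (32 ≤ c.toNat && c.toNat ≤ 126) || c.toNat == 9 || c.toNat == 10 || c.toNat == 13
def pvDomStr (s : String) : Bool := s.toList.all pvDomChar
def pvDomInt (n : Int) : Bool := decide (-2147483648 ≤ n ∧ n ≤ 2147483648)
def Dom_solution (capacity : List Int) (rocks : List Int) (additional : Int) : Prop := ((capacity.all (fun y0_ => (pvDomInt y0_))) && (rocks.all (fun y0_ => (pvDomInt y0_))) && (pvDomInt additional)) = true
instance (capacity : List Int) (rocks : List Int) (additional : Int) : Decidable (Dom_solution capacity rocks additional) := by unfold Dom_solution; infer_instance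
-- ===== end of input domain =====

-- B removes the sort: it repeatedly extracts the minimum gap from the unsorted pool
-- (selection) instead of sorting the difference array and scanning it with a break.

-- ===== PORT A =====
-- the 'for i in range(len(rocks)): if difference[i] > additional: break; …' loop
def pvLoopA : List Int → Int → Int → Int
  | [], _, count => count
  | d :: rest, additional, count =>
      if d > additional then count else pvLoopA rest (additional - d) (count + 1)

def solution (capacity : List Int) (rocks : List Int) (additional : Int) : Int :=
  let difference := (PySem.List.pyRange 0 (rocks.length : Int) 1).map
    (fun i => PySem.List.pyGetD capacity i 0 - PySem.List.pyGetD rocks i 0)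
  pvLoopA (PySem.List.sorted difference (fun x => x) false) additional 0

-- ===== PORT B =====
-- 'while gaps: m = min(gaps); if m > additional: break; gaps.remove(m); additional -= m; count += 1'
def pvFillB (gaps : List Int) (additional : Int) (count : Int) : Int :=
  match hm : PySem.List.min? gaps (fun x => x) with
  | none => count
  | some m =>
      if m > additional then count
      else pvFillB ((PySem.List.remove? gaps m).getD []) (additional - m) (count + 1)
termination_by gaps.length
decreasing_by
  have hmem := PySem.List.min?_mem hm
  rw [PySem.List.remove?_eq_some_erase gaps m hmem]
  have h1 := List.length_erase_of_mem hmem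
  have h2 := List.length_pos_of_mem hmem
  simp only [Option.getD_some]
  omega

def solution_alt (capacity : List Int) (rocks : List Int) (additional : Int) : Int :=
  let gaps := (capacity.zip rocks).map (fun p => p.1 - p.2)
  pvFillB gaps additional 0

-- ===== PRECONDITION & SPEC =====
-- A indexes capacity[i] for every i < len(rocks), so it raises IndexError when capacity is shorter.
def Pre_solution (capacity : List Int) (rocks : List Int) (additional : Int) : Prop :=
  rocks.length ≤ capacity.length
instance (capacity : List Int) (rocks : List Int) (additional : Int) : Decidable (Pre_solution capacity rocks additional) := by unfold Pre_solution; infer_instance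

def pvWitness_solution : List Int × List Int × Int := ([4, 2, 5], [2, 2, 1], 3)

def Spec_solution (capacity : List Int) (rocks : List Int) (additional : Int) (out : Int) : Prop := out = solution_alt capacity rocks additional
instance (capacity : List Int) (rocks : List Int) (additional : Int) (out : Int) : Decidable (Spec_solution capacity rocks additional out) := by unfold Spec_solution; infer_instance

-- ===== CLAIM =====
def Claim_equal_solution : Prop := ∀ (capacity : List Int) (rocks : List Int) (additional : Int), Dom_solution capacity rocks additional → Pre_solution capacity rocks additional → Spec_solution capacity rocks additional (solution capacity rocks additional)

-- ===== LEMMAS AND PROOFS =====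

lemma pyGetD_cons_succ (x : Int) (xs : List Int) (k : Nat) :
    PySem.List.pyGetD (x :: xs) ((k : Int) + 1) 0 = PySem.List.pyGetD xs (k : Int) 0 := by
  have h : ((k : Int) + 1) = ((k + 1 : Nat) : Int) := by push_cast; ring
  rw [h, PySem.List.pyGetD_natCast, PySem.List.pyGetD_natCast]
  simp

-- Under Pre_, A's indexed gap list equals B's zip gap list.
lemma gaps_eq (capacity rocks : List Int) (h : rocks.length ≤ capacity.length) :
    (PySem.List.pyRange 0 (rocks.length : Int) 1).map
      (fun i => PySem.List.pyGetD capacity i 0 - PySem.List.pyGetD rocks i 0)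
    = (capacity.zip rocks).map (fun p => p.1 - p.2) := by
  rw [PySem.List.pyRange_one]
  have h0 : ((rocks.length : Int) - 0).toNat = rocks.length := by omega
  rw [h0]
  induction rocks generalizing capacity with
  | nil => simp
  | cons r rs ih =>
      cases capacity with
      | nil => simp at h
      | cons c cs =>
          simp only [List.length_cons]
          rw [List.range_succ_eq_map]
          simp only [List.map_cons, List.map_map, List.zip_cons_cons]
          congr 1
          · simp [PySem.List.pyGetD]
          · have hih := ih cs (by simpa using h) (by omega)
            rw [← hih, List.map_map]
            apply List.map_congr_left
            intro k hk
            simp only [Function.comp, Nat.succ_eq_add_one]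
            rw [show ((0:Int) + ↑(k + 1)) = ((k : Int) + 1) by push_cast; ring,
                show ((0:Int) + ↑k) = ((k : Int)) by ring,
                pyGetD_cons_succ, pyGetD_cons_succ]

-- sorting a nonempty pool puts its minimum first, then the sorted remainder without it
lemma sorted_eq_min_cons (l : List Int) (m : Int)
    (hm : PySem.List.min? l (fun x => x) = some m) :
    PySem.List.sorted l (fun x => x) false
      = m :: PySem.List.sorted (l.erase m) (fun x => x) false := by
  have hmem := PySem.List.min?_mem hm
  have hmin := PySem.List.min?_isMin hm
  apply PySem.List.sorted_id_eq_of_perm_of_pairwise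
  · exact ((PySem.List.sorted_perm _ _ _).cons m).trans (List.perm_cons_erase hmem).symm
  · refine List.pairwise_cons.mpr ⟨fun y hy => ?_, PySem.List.sorted_pairwise _ _⟩
    exact hmin y (List.mem_of_mem_erase ((PySem.List.mem_sorted _ _ _ _).mp hy))

-- B's selection loop equals A's scan of the sorted pool
lemma fill_eq_loop (n : Nat) :
    ∀ (l : List Int), l.length = n → ∀ (add count : Int),
      pvFillB l add count = pvLoopA (PySem.List.sorted l (fun x => x) false) add count := by
  induction n with
  | zero =>
      intro l hl add count
      rw [List.length_eq_zero_iff.mp hl]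
      rw [pvFillB.eq_def]
      simp [PySem.List.min?, PySem.List.sorted, pvLoopA]
  | succ k ih =>
      intro l hl add count
      obtain ⟨m, hm⟩ : ∃ m, PySem.List.min? l (fun x => x) = some m := by
        cases hmo : PySem.List.min? l (fun x => x) with
        | none =>
            rw [PySem.List.min?_eq_none_iff] at hmo
            simp [hmo] at hl
        | some m => exact ⟨m, rfl⟩
      have hmem := PySem.List.min?_mem hm
      rw [sorted_eq_min_cons l m hm, pvFillB.eq_def]
      split
      · next heq => rw [hm] at heq; cases heq
      · next m' heq =>
          rw [hm] at heq
          injection heq with h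
          subst h
          simp only [pvLoopA]
          by_cases hgt : m > add
          · simp [hgt]
          · rw [if_neg hgt, if_neg hgt, PySem.List.remove?_eq_some_erase l m hmem]
            exact ih (l.erase m) (by have := List.length_erase_of_mem hmem; omega) _ _

-- ===== VERDICT =====
theorem solution_spec : Claim_equal_solution := by
  intro capacity rocks additional _ hpre
  unfold Spec_solution solution solution_alt
  rw [gaps_eq capacity rocks hpre]
  exact (fill_eq_loop _ _ rfl additional 0).symm
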